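-- pv_equiv track=rewrite | github.com/skandaka/snack-forge | backend/routes/ingredients.py | _meets_dietary_restrictions_ingredient
-- ===== SOURCE A (Python) =====
-- from typing import List, Dict, Any, Optional
--
-- def _meets_dietary_restrictions_ingredient(ingredient_data: Dict[str, Any], restrictions: List[str]) -> bool:
--     """Check if ingredient meets dietary restrictions"""
--     allergens = set(ingredient_data.get("allergens", []))
--
--     for restriction in restrictions:
--         if restriction == "vegan":
--             if any(allergen in allergens for allergen in ["milk", "eggs", "honey"]):
--                 return False
--         elif restriction == "gluten_free":
--             if "gluten" in allergens:
--                 return False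
--         elif restriction == "nut_free":
--             if any("nut" in allergen for allergen in allergens):
--                 return False
--         elif restriction == "dairy_free":
--             if "milk" in allergens:
--                 return False
--         elif restriction == "soy_free":
--             if "soy" in allergens:
--                 return False
--
--     return True
-- ===== SOURCE B (Python) =====
-- def _meets_dietary_restrictions_ingredient(ingredient_data, restrictions):
--     """Check if ingredient meets dietary restrictions"""
--     violated = set()
--     for allergen in ingredient_data.get("allergens", []):
--         if allergen == "milk":
--             violated.update(("vegan", "dairy_free"))
--         if allergen in ("eggs", "honey"):
--             violated.add("vegan")
--         if allergen == "gluten":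
--             violated.add("gluten_free")
--         if allergen == "soy":
--             violated.add("soy_free")
--         if "nut" in allergen:
--             violated.add("nut_free")
--     return not violated.intersection(restrictions)
-- ===== Notes on version B (the rewrite author's own statement) =====
-- stated objective: alternative
-- what changed: Inverts the traversal: instead of looping over restrictions and scanning the allergen set per restriction, B makes one pass over the allergens building a set of violated restriction names and finishes with a single intersection against the requested restrictions.
import Mathlib
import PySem

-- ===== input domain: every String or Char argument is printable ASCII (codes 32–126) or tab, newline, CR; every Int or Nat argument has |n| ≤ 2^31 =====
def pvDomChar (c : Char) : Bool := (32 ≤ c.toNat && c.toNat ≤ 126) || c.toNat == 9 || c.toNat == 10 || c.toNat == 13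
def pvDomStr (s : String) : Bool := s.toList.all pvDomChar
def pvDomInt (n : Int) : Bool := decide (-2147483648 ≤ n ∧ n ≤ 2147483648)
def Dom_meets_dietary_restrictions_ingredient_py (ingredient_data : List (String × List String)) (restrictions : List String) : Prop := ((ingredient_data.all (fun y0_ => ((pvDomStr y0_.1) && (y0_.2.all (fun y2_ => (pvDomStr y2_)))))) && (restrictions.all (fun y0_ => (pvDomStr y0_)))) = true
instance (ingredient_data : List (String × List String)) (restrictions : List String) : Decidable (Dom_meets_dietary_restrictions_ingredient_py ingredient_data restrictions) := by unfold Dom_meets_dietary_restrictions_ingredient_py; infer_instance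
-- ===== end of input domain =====

-- B inverts A's traversal: one pass over the allergens building the set of violated
-- restriction names, then a single intersection with the requested restrictions
-- (alternative decomposition; same return value everywhere).

-- ===== PORT A =====
-- 'for restriction in restrictions: … return False' with early exit, over set(allergens)
def pyA_loop (allergens : PySem.Set String) : List String → Bool
  | [] => true
  | r :: rest =>
    if r == "vegan" then
      if (["milk", "eggs", "honey"] : List String).any (fun a => PySem.Set.contains allergens a) then false
      else pyA_loop allergens rest
    else if r == "gluten_free" then
      if PySem.Set.contains allergens "gluten" then false else pyA_loop allergens rest
    else if r == "nut_free" then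
      if allergens.any (fun a => PySem.Str.isIn "nut" a) then false else pyA_loop allergens rest
    else if r == "dairy_free" then
      if PySem.Set.contains allergens "milk" then false else pyA_loop allergens rest
    else if r == "soy_free" then
      if PySem.Set.contains allergens "soy" then false else pyA_loop allergens rest
    else pyA_loop allergens rest

-- ingredient_data.get("allergens", []) — first-match lookup in the association list
def meets_dietary_restrictions_ingredient_py (ingredient_data : List (String × List String)) (restrictions : List String) : Bool :=
  pyA_loop (PySem.Set.ofList ((ingredient_data.lookup "allergens").getD [])) restrictions

-- ===== PORT B =====
-- B's loop body: the restrictions one allergen violates are added to the set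
def pyB_step (v : PySem.Set String) (a : String) : PySem.Set String :=
  let v := if a == "milk" then PySem.Set.update v ["vegan", "dairy_free"] else v
  let v := if a == "eggs" || a == "honey" then PySem.Set.add v "vegan" else v
  let v := if a == "gluten" then PySem.Set.add v "gluten_free" else v
  let v := if a == "soy" then PySem.Set.add v "soy_free" else v
  if PySem.Str.isIn "nut" a then PySem.Set.add v "nut_free" else v

def meets_dietary_restrictions_ingredient_py_alt (ingredient_data : List (String × List String)) (restrictions : List String) : Bool :=
  let violated := ((ingredient_data.lookup "allergens").getD []).foldl pyB_step PySem.Set.empty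
  (PySem.Set.inter violated restrictions).isEmpty

-- ===== PRECONDITION & SPEC =====
def Spec_meets_dietary_restrictions_ingredient_py (ingredient_data : List (String × List String)) (restrictions : List String) (out : Bool) : Prop := out = meets_dietary_restrictions_ingredient_py_alt ingredient_data restrictions
instance (ingredient_data : List (String × List String)) (restrictions : List String) (out : Bool) : Decidable (Spec_meets_dietary_restrictions_ingredient_py ingredient_data restrictions out) := by unfold Spec_meets_dietary_restrictions_ingredient_py; infer_instance

-- ===== CLAIM (what is proved, stated in full; the proofs are below) =====
def Claim_equal_meets_dietary_restrictions_ingredient_py : Prop := ∀ (ingredient_data : List (String × List String)) (restrictions : List String), Dom_meets_dietary_restrictions_ingredient_py ingredient_data restrictions → Spec_meets_dietary_restrictions_ingredient_py ingredient_data restrictions (meets_dietary_restrictions_ingredient_py ingredient_data restrictions)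

-- ===== LEMMAS AND PROOFS =====

-- proof-side characterisation over the raw allergen list: does `al` violate restriction `r`?
def pvViolates (al : List String) (r : String) : Bool :=
  (r == "vegan" && (al.contains "milk" || al.contains "eggs" || al.contains "honey")) ||
  (r == "gluten_free" && al.contains "gluten") ||
  (r == "nut_free" && al.any (fun a => PySem.Str.isIn "nut" a)) ||
  (r == "dairy_free" && al.contains "milk") ||
  (r == "soy_free" && al.contains "soy")

-- the same, phrased over the set exactly as A's port tests it
def pvViolS (s : PySem.Set String) (r : String) : Bool :=
  (r == "vegan" && (["milk", "eggs", "honey"] : List String).any (fun a => PySem.Set.contains s a)) ||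
  (r == "gluten_free" && PySem.Set.contains s "gluten") ||
  (r == "nut_free" && s.any (fun a => PySem.Str.isIn "nut" a)) ||
  (r == "dairy_free" && PySem.Set.contains s "milk") ||
  (r == "soy_free" && PySem.Set.contains s "soy")

-- what one allergen `a` triggers for restriction `r` (B's per-allergen step, as a predicate)
def pvTrig (a r : String) : Bool :=
  (a == "milk" && (r == "vegan" || r == "dairy_free")) ||
  ((a == "eggs" || a == "honey") && r == "vegan") ||
  (a == "gluten" && r == "gluten_free") ||
  (a == "soy" && r == "soy_free") ||
  (PySem.Str.isIn "nut" a && r == "nut_free")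

lemma pyA_loop_eq_all (s : PySem.Set String) (rs : List String) :
    pyA_loop s rs = rs.all (fun r => !pvViolS s r) := by
  induction rs with
  | nil => rfl
  | cons r rest ih =>
    simp only [pyA_loop, List.all_cons, ih, pvViolS]
    by_cases h1 : r = "vegan"
    · subst h1
      rcases Bool.eq_false_or_eq_true ((["milk", "eggs", "honey"] : List String).any (fun a => PySem.Set.contains s a)) with hc | hc <;> simp [hc]
    · by_cases h2 : r = "gluten_free"
      · subst h2
        rcases Bool.eq_false_or_eq_true (PySem.Set.contains s "gluten") with hc | hc <;> simp [hc]
      · by_cases h3 : r = "nut_free"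
        · subst h3
          rcases Bool.eq_false_or_eq_true (s.any (fun a => PySem.Str.isIn "nut" a)) with hc | hc <;>
            simp only [hc] <;> simp
        · by_cases h4 : r = "dairy_free"
          · subst h4
            rcases Bool.eq_false_or_eq_true (PySem.Set.contains s "milk") with hc | hc <;> simp [hc]
          · by_cases h5 : r = "soy_free"
            · subst h5
              rcases Bool.eq_false_or_eq_true (PySem.Set.contains s "soy") with hc | hc <;> simp [hc]
            · simp [h1, h2, h3, h4, h5]

lemma violS_ofList (al : List String) (r : String) :
    pvViolS (PySem.Set.ofList al) r = pvViolates al r := by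
  rw [Bool.eq_iff_iff]
  simp only [pvViolS, pvViolates, Bool.or_eq_true, Bool.and_eq_true, List.any_eq_true,
    PySem.Set.contains_iff, PySem.Set.mem_ofList, List.contains_eq_mem, decide_eq_true_eq,
    List.mem_cons, List.not_mem_nil, or_false, beq_iff_eq, exists_eq_or_imp, exists_eq_left,
    or_assoc, and_assoc]
  all_goals tauto

lemma mem_pyB_step (v : PySem.Set String) (a r : String) :
    r ∈ pyB_step v a ↔ r ∈ v ∨ pvTrig a r = true := by
  unfold pyB_step pvTrig
  by_cases h1 : a = "milk"
  · subst h1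
    simp [PySem.Set.mem_update, PySem.Set.mem_add,
      show PySem.Str.isIn "nut" "milk" = false from by decide,
      show PySem.Chars.isIn ['n', 'u', 't'] ['m', 'i', 'l', 'k'] = false from by decide]
    all_goals tauto
  · by_cases h2 : a = "eggs"
    · subst h2
      simp [PySem.Set.mem_add,
        show PySem.Str.isIn "nut" "eggs" = false from by decide,
        show PySem.Chars.isIn ['n', 'u', 't'] ['e', 'g', 'g', 's'] = false from by decide]
      all_goals tauto
    · by_cases h3 : a = "honey"
      · subst h3
        simp [PySem.Set.mem_add,
          show PySem.Str.isIn "nut" "honey" = false from by decide,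
          show PySem.Chars.isIn ['n', 'u', 't'] ['h', 'o', 'n', 'e', 'y'] = false from by decide]
        all_goals tauto
      · by_cases h4 : a = "gluten"
        · subst h4
          simp [PySem.Set.mem_add,
            show PySem.Str.isIn "nut" "gluten" = false from by decide,
            show PySem.Chars.isIn ['n', 'u', 't'] ['g', 'l', 'u', 't', 'e', 'n'] = false from by decide]
          all_goals tauto
        · by_cases h5 : a = "soy"
          · subst h5
            simp [PySem.Set.mem_add,
              show PySem.Str.isIn "nut" "soy" = false from by decide,
              show PySem.Chars.isIn ['n', 'u', 't'] ['s', 'o', 'y'] = false from by decide]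
            all_goals tauto
          · by_cases hn : PySem.Str.isIn "nut" a = true
            · simp at hn
              simp [h1, h2, h3, h4, h5, hn, PySem.Set.mem_add]
              all_goals tauto
            · simp at hn
              simp [h1, h2, h3, h4, h5, hn]

lemma mem_pyB_foldl (al : List String) (acc : PySem.Set String) (r : String) :
    r ∈ al.foldl pyB_step acc ↔ r ∈ acc ∨ ∃ a ∈ al, pvTrig a r = true := by
  induction al generalizing acc with
  | nil => simp
  | cons a rest ih =>
    rw [List.foldl_cons, ih, mem_pyB_step]
    simp only [List.mem_cons]
    constructor
    · rintro ((h | h) | ⟨x, hx, ht⟩)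
      · exact Or.inl h
      · exact Or.inr ⟨a, Or.inl rfl, h⟩
      · exact Or.inr ⟨x, Or.inr hx, ht⟩
    · rintro (h | ⟨x, (rfl | hx), ht⟩)
      · exact Or.inl (Or.inl h)
      · exact Or.inl (Or.inr ht)
      · exact Or.inr ⟨x, hx, ht⟩

lemma violates_iff_exists_trig (al : List String) (r : String) :
    pvViolates al r = true ↔ ∃ a ∈ al, pvTrig a r = true := by
  constructor
  · intro h
    simp only [pvViolates, Bool.or_eq_true, Bool.and_eq_true, beq_iff_eq,
      List.contains_eq_mem, decide_eq_true_eq, List.any_eq_true] at h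
    rcases h with ((((⟨hr, h⟩ | ⟨hr, h⟩) | ⟨hr, h⟩) | ⟨hr, h⟩) | ⟨hr, h⟩)
    · rcases h with ((h | h) | h)
      · exact ⟨"milk", h, by simp [pvTrig, hr]⟩
      · exact ⟨"eggs", h, by simp [pvTrig, hr]⟩
      · exact ⟨"honey", h, by simp [pvTrig, hr]⟩
    · exact ⟨"gluten", h, by simp [pvTrig, hr]⟩
    · obtain ⟨x, hx, hn⟩ := h
      refine ⟨x, hx, ?_⟩
      simp only [pvTrig, hr, hn, beq_self_eq_true, Bool.true_and, Bool.and_true,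
        Bool.true_or, Bool.or_true]
    · exact ⟨"milk", h, by simp [pvTrig, hr]⟩
    · exact ⟨"soy", h, by simp [pvTrig, hr]⟩
  · rintro ⟨a, ha, ht⟩
    simp only [pvTrig, Bool.or_eq_true, Bool.and_eq_true, beq_iff_eq] at ht
    simp only [pvViolates, Bool.or_eq_true, Bool.and_eq_true, beq_iff_eq,
      List.contains_eq_mem, decide_eq_true_eq, List.any_eq_true]
    rcases ht with ((((⟨rfl, hr⟩ | ⟨h1, rfl⟩) | ⟨rfl, rfl⟩) | ⟨rfl, rfl⟩) | ⟨hn, rfl⟩)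
    · rcases hr with rfl | rfl
      · exact Or.inl (Or.inl (Or.inl (Or.inl ⟨rfl, Or.inl (Or.inl ha)⟩)))
      · exact Or.inl (Or.inr ⟨rfl, ha⟩)
    · rcases h1 with rfl | rfl
      · exact Or.inl (Or.inl (Or.inl (Or.inl ⟨rfl, Or.inl (Or.inr ha)⟩)))
      · exact Or.inl (Or.inl (Or.inl (Or.inl ⟨rfl, Or.inr ha⟩)))
    · exact Or.inl (Or.inl (Or.inl (Or.inr ⟨rfl, ha⟩)))
    · exact Or.inr ⟨rfl, ha⟩
    · exact Or.inl (Or.inl (Or.inr ⟨rfl, a, ha, hn⟩))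

lemma mem_pyB_violated (al : List String) (r : String) :
    r ∈ al.foldl pyB_step PySem.Set.empty ↔ pvViolates al r = true := by
  rw [mem_pyB_foldl, violates_iff_exists_trig]
  simp [PySem.Set.empty]

lemma alt_eq_all (al : List String) (rs : List String) :
    (PySem.Set.inter (al.foldl pyB_step PySem.Set.empty) rs).isEmpty
      = rs.all (fun r => !pvViolates al r) := by
  rcases Bool.eq_false_or_eq_true (rs.all (fun r => !pvViolates al r)) with h | h
  · rw [h, List.isEmpty_iff, List.eq_nil_iff_forall_not_mem]
    rw [List.all_eq_true] at h
    intro x hx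
    rw [PySem.Set.mem_inter] at hx
    obtain ⟨hv, hr⟩ := hx
    have hx2 := h x hr
    rw [mem_pyB_violated al x] at hv
    rw [hv] at hx2
    exact absurd hx2 (by decide)
  · rw [h, List.isEmpty_eq_false_iff_exists_mem]
    rw [List.all_eq_false] at h
    obtain ⟨r, hr, hv⟩ := h
    have hv2 : pvViolates al r = true := by
      cases hpv : pvViolates al r
      · rw [hpv] at hv; exact absurd hv (by decide)
      · rfl
    refine ⟨r, ?_⟩
    rw [PySem.Set.mem_inter]
    exact ⟨(mem_pyB_violated al r).mpr hv2, hr⟩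

-- ===== VERDICT (by name: the statement is the Claim_ definition above) =====
theorem meets_dietary_restrictions_ingredient_py_spec : Claim_equal_meets_dietary_restrictions_ingredient_py := by
  intro ingredient_data restrictions _
  unfold Spec_meets_dietary_restrictions_ingredient_py
  unfold meets_dietary_restrictions_ingredient_py meets_dietary_restrictions_ingredient_py_alt
  rw [pyA_loop_eq_all, alt_eq_all]
  simp only [violS_ofList]
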